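-- pv_equiv track=rewrite | github.com/Subhangi-2216/KharchaNepal | backend/src/email_processing/processing_rules.py | _has_suspicious_patterns
-- ===== SOURCE A (Python) =====
-- from typing import Dict, Any, List, Optional
--
-- def _has_suspicious_patterns(subject: str, extracted_data: Dict[str, Any]) -> bool:
--     """Check for suspicious patterns that might indicate spam or fraud."""
--     suspicious_keywords = [
--         "congratulations", "winner", "lottery", "prize", "urgent",
--         "click here", "limited time", "act now", "free money",
--         "claim now", "verify account", "suspended", "locked"
--     ]
--
--     text_to_check = f"{subject} {extracted_data.get('content_preview', '')}"
--     text_lower = text_to_check.lower()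
--
--     return any(keyword in text_lower for keyword in suspicious_keywords)
-- ===== SOURCE B (Python) =====
-- def _has_suspicious_patterns(subject, extracted_data):
--     """Check for suspicious patterns that might indicate spam or fraud."""
--     suspicious_keywords = [
--         "congratulations", "winner", "lottery", "prize", "urgent",
--         "click here", "limited time", "act now", "free money",
--         "claim now", "verify account", "suspended", "locked"
--     ]
--     text_lower = f"{subject} {extracted_data.get('content_preview', '')}".lower()
--     # index the keywords by their first letter once, then make a single
--     # position-major pass over the text: at each position only the keywords
--     # that could start there are tested
--     buckets = {}
--     for kw in suspicious_keywords:
--         buckets.setdefault(kw[0], []).append(kw)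
--     return any(
--         any(text_lower.startswith(kw, i) for kw in buckets.get(c, []))
--         for i, c in enumerate(text_lower)
--     )
-- ===== Notes on version B (the rewrite author's own statement) =====
-- stated objective: alternative
-- what changed: A scans the whole combined text once per keyword (13 repeated substring searches); B first buckets the keywords by their first letter in a dict, then makes a single position-major pass over the text, testing at each position only the keywords whose first letter matches the character there.
import Mathlib
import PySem

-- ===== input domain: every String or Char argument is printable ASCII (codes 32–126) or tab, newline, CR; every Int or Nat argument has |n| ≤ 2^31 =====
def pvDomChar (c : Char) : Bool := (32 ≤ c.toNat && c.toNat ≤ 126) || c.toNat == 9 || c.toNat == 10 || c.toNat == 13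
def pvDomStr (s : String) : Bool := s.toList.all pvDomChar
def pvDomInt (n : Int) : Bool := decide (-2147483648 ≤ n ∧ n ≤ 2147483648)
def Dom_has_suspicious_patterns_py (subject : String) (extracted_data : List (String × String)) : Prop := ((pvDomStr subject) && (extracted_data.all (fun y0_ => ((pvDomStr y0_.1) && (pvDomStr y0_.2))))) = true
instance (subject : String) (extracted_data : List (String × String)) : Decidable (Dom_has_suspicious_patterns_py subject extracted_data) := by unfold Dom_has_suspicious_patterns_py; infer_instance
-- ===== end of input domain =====

-- B replaces A's keyword-major repeated substring scans by a first-letter keyword index plus one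
-- position-major pass over the text (objective: alternative structure).

-- ===== PORT A =====
def pvKeywordsA : List String :=
  ["congratulations", "winner", "lottery", "prize", "urgent",
   "click here", "limited time", "act now", "free money",
   "claim now", "verify account", "suspended", "locked"]

def has_suspicious_patterns_py (subject : String) (extracted_data : List (String × String)) : Bool :=
  let text_to_check := subject ++ " " ++ (PySem.Dict.ofList extracted_data).getD "content_preview" ""
  let text_lower := PySem.Str.lower text_to_check
  pvKeywordsA.any (fun kw => PySem.Str.isIn kw text_lower)

-- ===== PORT B =====
def pvKeywordsB : List String :=
  ["congratulations", "winner", "lottery", "prize", "urgent",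
   "click here", "limited time", "act now", "free money",
   "claim now", "verify account", "suspended", "locked"]

-- kw[0]; exact for nonempty kw (every keyword in pvKeywordsB is nonempty)
def pvFirstChar (kw : String) : Char := kw.toList.headD ' '

def has_suspicious_patterns_py_alt (subject : String) (extracted_data : List (String × String)) : Bool :=
  let text_lower := PySem.Str.lower (subject ++ " " ++ (PySem.Dict.ofList extracted_data).getD "content_preview" "")
  let cs := text_lower.toList
  -- buckets.setdefault(kw[0], []).append(kw)  ≡  d[kw[0]] = d.get(kw[0], []) + [kw]  = Dict.modify
  let buckets : PySem.Dict Char (List String) :=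
    pvKeywordsB.foldl (fun d kw => d.modify (pvFirstChar kw) [] (· ++ [kw])) PySem.Dict.empty
  -- text_lower.startswith(kw, i) with 0 ≤ i ≤ len: exactly 'kw is a prefix of the text dropped by i'
  (PySem.List.enumerate cs 0).any (fun ic =>
    (buckets.getD ic.2 []).any (fun kw => PySem.Chars.startswith (cs.drop ic.1.toNat) kw.toList))

-- ===== PRECONDITION & SPEC =====
def Spec_has_suspicious_patterns_py (subject : String) (extracted_data : List (String × String)) (out : Bool) : Prop := out = has_suspicious_patterns_py_alt subject extracted_data
instance (subject : String) (extracted_data : List (String × String)) (out : Bool) : Decidable (Spec_has_suspicious_patterns_py subject extracted_data out) := by unfold Spec_has_suspicious_patterns_py; infer_instance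

-- ===== CLAIM (what is proved, stated in full; the proofs are below) =====
def Claim_equal_has_suspicious_patterns_py : Prop := ∀ (subject : String) (extracted_data : List (String × String)), Dom_has_suspicious_patterns_py subject extracted_data → Spec_has_suspicious_patterns_py subject extracted_data (has_suspicious_patterns_py subject extracted_data)

-- ===== LEMMAS AND PROOFS =====

-- the first-letter buckets hold exactly the keywords starting with that letter, in order
lemma getD_buckets (K : List String) (c : Char) :
    (K.foldl (fun d kw => d.modify (pvFirstChar kw) [] (· ++ [kw])) PySem.Dict.empty).getD c [] =
    K.filter (fun kw => pvFirstChar kw == c) := by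
  have h1 : K.foldl (fun d kw => d.modify (pvFirstChar kw) [] (· ++ [kw])) PySem.Dict.empty
      = (K.map (fun kw => (pvFirstChar kw, kw))).foldl
          (fun d p => d.modify p.1 [] (· ++ [p.2])) PySem.Dict.empty := by
    rw [List.foldl_map]
  rw [h1, PySem.Dict.getD_foldl_modify_append]
  simp [List.filter_map, List.map_map, Function.comp_def]

-- a keyword matching at position k starts with the character at position k
lemma firstChar_of_startswith (cs : List Char) (kw : String) (k : Nat) (hk : k < cs.length)
    (hne : kw.toList ≠ []) (hsw : PySem.Chars.startswith (cs.drop k) kw.toList = true) :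
    (pvFirstChar kw == cs[k]) = true := by
  rw [PySem.Chars.startswith_iff] at hsw
  cases h : kw.toList with
  | nil => exact absurd h hne
  | cons a t =>
    rw [h, List.drop_eq_getElem_cons hk] at hsw
    have := (List.cons_prefix_cons.mp hsw).1
    simp [pvFirstChar, h, this]

-- keyword-major 'any keyword occurs somewhere' = position-major pass over the first-letter buckets
lemma any_isIn_eq_enumerate_buckets (K : List String) (hK : ∀ kw ∈ K, kw.toList ≠ [])
    (cs : List Char) :
    K.any (fun kw => PySem.Chars.isIn kw.toList cs) =
    (PySem.List.enumerate cs 0).any (fun ic =>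
      ((K.foldl (fun d kw => d.modify (pvFirstChar kw) [] (· ++ [kw])) PySem.Dict.empty).getD ic.2 []).any
        (fun kw => PySem.Chars.startswith (cs.drop ic.1.toNat) kw.toList)) := by
  apply Bool.eq_iff_iff.mpr
  simp only [List.any_eq_true, PySem.List.mem_enumerate_iff, getD_buckets, List.mem_filter,
    zero_add]
  constructor
  · rintro ⟨kw, hkw, h⟩
    obtain ⟨j, hj⟩ := (PySem.Chars.exists_prefix_drop_iff_isIn kw.toList cs).mpr h
    have hjlen : j < cs.length := by
      by_contra hlen
      have hd : cs.drop j = [] := List.drop_eq_nil_of_le (by omega)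
      rw [hd] at hj
      exact hK kw hkw (List.prefix_nil.mp hj)
    have hsw : PySem.Chars.startswith (cs.drop j) kw.toList = true := by
      rw [PySem.Chars.startswith_iff]; exact hj
    refine ⟨((j : Int), cs[j]), ⟨j, hjlen, by simp⟩, kw,
      ⟨hkw, firstChar_of_startswith cs kw j hjlen (hK kw hkw) hsw⟩, ?_⟩
    simpa using hsw
  · rintro ⟨ic, ⟨k, hk, rfl⟩, kw, ⟨hkw, _⟩, hsw⟩
    rw [PySem.Chars.startswith_iff] at hsw
    exact ⟨kw, hkw, (PySem.Chars.exists_prefix_drop_iff_isIn kw.toList cs).mp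
      ⟨k, by simpa using hsw⟩⟩

-- ===== VERDICT (by name: the statement is the Claim_ definition above) =====
theorem has_suspicious_patterns_py_spec : Claim_equal_has_suspicious_patterns_py := by
  intro subject extracted_data _
  unfold Spec_has_suspicious_patterns_py has_suspicious_patterns_py has_suspicious_patterns_py_alt
  simp only [PySem.Str.isIn_eq]
  exact any_isIn_eq_enumerate_buckets pvKeywordsA (by decide) _
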